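-- pv_equiv track=rewrite | github.com/IsBenben/isbenben.github.io | raw/find-patterns.py | exactly_divide
-- ===== SOURCE A (Python) =====
-- def exactly_divide(a, b):
--     remainder = []
--     res = []
--     t = a % b
--     while str(t) not in remainder:
--         remainder.append(str(t))
--         t *= 10
--         res.append(str(t // b))
--         t %= b
--
--     return (
--         str(a // b),
--         ''.join(res[:remainder.index(str(t))]),
--         ''.join(res[remainder.index(str(t)) - len(remainder):]),
--     )
-- ===== SOURCE B (Python) =====
-- def exactly_divide(a, b):
--     # No remainder storage or cycle detection: the split point and the period are
--     # computed arithmetically (preperiod = max of the 2- and 5-adic valuations of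
--     # the reduced denominator, period = multiplicative order of 10 modulo its
--     # 10-coprime part), then exactly that many digits are emitted.
--     t = a % b
--     x, y = abs(t), abs(b)
--     while y:
--         x, y = y, x % y
--     d = abs(b) // x
--     two = 0
--     while d % 2 == 0:
--         d //= 2
--         two += 1
--     five = 0
--     while d % 5 == 0:
--         d //= 5
--         five += 1
--     s = max(two, five)
--     p = 1
--     r = 10 % d
--     while r != 1 % d:
--         r = r * 10 % d
--         p += 1
--     digits = []
--     u = t
--     for _ in range(s + p):
--         u *= 10
--         digits.append(str(u // b))
--         u %= b
--     return (str(a // b), ''.join(digits[:s]), ''.join(digits[s:]))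
-- ===== Notes on version B (the rewrite author's own statement) =====
-- stated objective: faster
-- what changed: B drops A's cycle detection (a growing remainder list scanned by 'in' and two '.index' calls) entirely: it computes the non-repeating length as the max of the 2- and 5-adic valuations of the reduced denominator and the period as the multiplicative order of 10 modulo the denominator's 10-coprime part, then emits exactly that many digits with no remainder history.
-- outside the precondition, e.g. on exactly_divide(1, 0): A raises ZeroDivisionError, B raises ZeroDivisionError
import Mathlib
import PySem

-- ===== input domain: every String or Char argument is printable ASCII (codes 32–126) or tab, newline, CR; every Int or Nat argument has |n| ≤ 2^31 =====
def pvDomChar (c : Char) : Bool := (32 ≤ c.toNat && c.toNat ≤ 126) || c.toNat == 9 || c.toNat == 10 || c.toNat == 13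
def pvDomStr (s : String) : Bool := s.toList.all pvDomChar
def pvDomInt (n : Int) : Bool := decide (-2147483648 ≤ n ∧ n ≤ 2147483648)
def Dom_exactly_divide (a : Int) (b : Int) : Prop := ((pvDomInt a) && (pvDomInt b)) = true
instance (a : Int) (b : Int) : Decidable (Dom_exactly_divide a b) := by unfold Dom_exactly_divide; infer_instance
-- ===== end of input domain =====

-- B replaces A's cycle detection (a remainder list scanned by 'in' and '.index')
-- by arithmetic: the non-repeating length is max of the 2- and 5-adic valuations
-- of the reduced denominator and the period is the multiplicative order of 10
-- modulo its 10-coprime part; B then emits exactly that many digits, keeping no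
-- remainder history at all.  Both ports use a fuel that provably never runs out.

-- ===== PORT A =====
-- the while loop of A: state (remainder, res, t); fuel-guarded structural recursion
def aLoop (b : Int) : Nat → List String → List String → Int → List String × List String × Int
  | 0, rem, res, t => (rem, res, t)
  | f+1, rem, res, t =>
    if PySem.Int.toStr t ∈ rem then (rem, res, t)
    else
      let rem' := rem ++ [PySem.Int.toStr t]
      let t1 := t * 10
      let res' := res ++ [PySem.Int.toStr (PySem.Int.floordiv t1 b)]
      aLoop b f rem' res' (PySem.Int.mod t1 b)

def exactly_divide (a : Int) (b : Int) : List String :=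
  let st := aLoop b (b.natAbs + 1) [] [] (PySem.Int.mod a b)
  match PySem.List.index? st.1 (PySem.Int.toStr st.2.2) with
  | none => []   -- unreachable: the loop only stops when str(t) is in remainder
  | some k =>
    [ PySem.Int.toStr (PySem.Int.floordiv a b),
      PySem.Str.join "" (PySem.List.slice st.2.1 none (some (k : Int))),
      PySem.Str.join "" (PySem.List.slice st.2.1 (some ((k : Int) - PySem.List.len st.1)) none) ]

-- ===== PORT B =====
-- Euclid's loop 'while y: x, y = y, x % y'
def gcdLoop : Nat → Int → Int → Int
  | 0, x, _ => x
  | f+1, x, y => if y = 0 then x else gcdLoop f y (PySem.Int.mod x y)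

-- 'while d % q == 0: d //= q; c += 1'  (returns final d and counter)
def stripLoop (q : Int) : Nat → Int → Int → Int × Int
  | 0, d, c => (d, c)
  | f+1, d, c =>
    if PySem.Int.mod d q = 0 then stripLoop q f (PySem.Int.floordiv d q) (c + 1)
    else (d, c)

-- 'while r != 1 % m: r = r * 10 % m; p += 1'
def ordLoop (m : Int) : Nat → Int → Int → Int
  | 0, _, p => p   -- fuel never exhausted
  | f+1, r, p =>
    if r = PySem.Int.mod 1 m then p
    else ordLoop m f (PySem.Int.mod (r * 10) m) (p + 1)

-- 'for _ in range(n): u *= 10; digits.append(str(u // b)); u %= b'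
def digitLoop (b : Int) : Nat → List String → Int → List String × Int
  | 0, ds, u => (ds, u)
  | n+1, ds, u =>
    digitLoop b n (ds ++ [PySem.Int.toStr (PySem.Int.floordiv (u * 10) b)]) (PySem.Int.mod (u * 10) b)

def exactly_divide_alt (a : Int) (b : Int) : List String :=
  let t := PySem.Int.mod a b
  let g := gcdLoop (b.natAbs + 2) (t.natAbs : Int) (b.natAbs : Int)
  let d0 := PySem.Int.floordiv (b.natAbs : Int) g
  let r2 := stripLoop 2 (d0.natAbs + 1) d0 0
  let r5 := stripLoop 5 (r2.1.natAbs + 1) r2.1 0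
  let s := max r2.2 r5.2
  let p := ordLoop r5.1 (r5.1.natAbs + 1) (PySem.Int.mod 10 r5.1) 1
  let dg := digitLoop b (s + p).toNat [] t
  [ PySem.Int.toStr (PySem.Int.floordiv a b),
    PySem.Str.join "" (PySem.List.slice dg.1 none (some s)),
    PySem.Str.join "" (PySem.List.slice dg.1 (some s) none) ]

-- ===== PRECONDITION & SPEC =====
-- Pre_ excludes only b = 0, where Python's a % b raises ZeroDivisionError.
def Pre_exactly_divide (a : Int) (b : Int) : Prop := b ≠ 0
instance (a : Int) (b : Int) : Decidable (Pre_exactly_divide a b) := by unfold Pre_exactly_divide; infer_instance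
def pvWitness_exactly_divide : Int × Int := (1, 7)

def Spec_exactly_divide (a : Int) (b : Int) (out : List String) : Prop := out = exactly_divide_alt a b
instance (a : Int) (b : Int) (out : List String) : Decidable (Spec_exactly_divide a b out) := by unfold Spec_exactly_divide; infer_instance

-- ===== CLAIM (what is proved, stated in full; the proofs are below) =====
def Claim_equal_exactly_divide : Prop := ∀ (a : Int) (b : Int), Dom_exactly_divide a b → Pre_exactly_divide a b → Spec_exactly_divide a b (exactly_divide a b)

-- ===== LEMMAS AND PROOFS =====

-- ---------- Python-mod arithmetic ----------

theorem pm_dvd_sub_self (x b : Int) : b ∣ x - PySem.Int.mod x b := by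
  have h := PySem.Int.floordiv_mul_add_mod x b
  exact ⟨PySem.Int.floordiv x b, by linarith [h]⟩

theorem pm_congr_iff (x y b : Int) (hb : b ≠ 0) :
    PySem.Int.mod x b = PySem.Int.mod y b ↔ b ∣ x - y := by
  constructor
  · intro heq
    have h1 := pm_dvd_sub_self x b
    have h2 := pm_dvd_sub_self y b
    have h3 := dvd_sub h1 h2
    have he : (x - PySem.Int.mod x b) - (y - PySem.Int.mod y b) = x - y := by
      rw [heq]; ring
    rwa [he] at h3
  · intro hdvd
    have h1 := pm_dvd_sub_self x b
    have h2 := pm_dvd_sub_self y b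
    have h3 : b ∣ PySem.Int.mod x b - PySem.Int.mod y b := by
      have he : PySem.Int.mod x b - PySem.Int.mod y b
          = (x - y) - (x - PySem.Int.mod x b) + (y - PySem.Int.mod y b) := by ring
      rw [he]
      exact dvd_add (dvd_sub hdvd h1) h2
    have hzero : PySem.Int.mod x b - PySem.Int.mod y b = 0 := by
      rcases lt_or_gt_of_ne hb with hneg | hpos
      · have b1 := PySem.Int.mod_neg_bounds x hneg
        have b2 := PySem.Int.mod_neg_bounds y hneg
        exact Int.eq_zero_of_dvd_of_natAbs_lt_natAbs h3 (by omega)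
      · have b1 := PySem.Int.mod_nonneg x hpos
        have b2 := PySem.Int.mod_lt x hpos
        have b3 := PySem.Int.mod_nonneg y hpos
        have b4 := PySem.Int.mod_lt y hpos
        exact Int.eq_zero_of_dvd_of_natAbs_lt_natAbs h3 (by omega)
    omega

theorem pm_idem (x b : Int) (hb : b ≠ 0) :
    PySem.Int.mod (PySem.Int.mod x b) b = PySem.Int.mod x b := by
  rw [pm_congr_iff _ _ _ hb]
  have h := pm_dvd_sub_self x b
  have he : PySem.Int.mod x b - x = -(x - PySem.Int.mod x b) := by ring
  rw [he]
  exact h.neg_right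

theorem pm_mul10 (x b : Int) (hb : b ≠ 0) :
    PySem.Int.mod (PySem.Int.mod x b * 10) b = PySem.Int.mod (x * 10) b := by
  rw [pm_congr_iff _ _ _ hb]
  have h := pm_dvd_sub_self x b
  have he : PySem.Int.mod x b * 10 - x * 10 = -((x - PySem.Int.mod x b) * 10) := by ring
  rw [he]
  exact (h.mul_right 10).neg_right

-- the remainder sequence t_i = (t0 * 10^i) mod b
def Tseq (b t0 : Int) (i : Nat) : Int := PySem.Int.mod (t0 * 10 ^ i) b

theorem Tseq_succ (b t0 : Int) (hb : b ≠ 0) (k : Nat) :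
    Tseq b t0 (k + 1) = PySem.Int.mod (Tseq b t0 k * 10) b := by
  unfold Tseq
  rw [pm_mul10 _ _ hb]
  have he : t0 * 10 ^ (k + 1) = t0 * 10 ^ k * 10 := by ring
  rw [he]

-- ---------- the divisibility characterisation ----------

theorem nat_dvd_char (g n0 α β M i d : Nat) (hg : 0 < g)
    (hcop : Nat.Coprime n0 (2 ^ α * (5 ^ β * M)))
    (hM2 : ¬ 2 ∣ M) (hM5 : ¬ 5 ∣ M) (hd : 1 ≤ d) :
    g * (2 ^ α * (5 ^ β * M)) ∣ (g * n0) * (10 ^ i * (10 ^ d - 1)) ↔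
      (α ≤ i ∧ β ≤ i ∧ M ∣ 10 ^ d - 1) := by
  have p2 : Nat.Prime 2 := Nat.prime_two
  have p5 : Nat.Prime 5 := Nat.prime_five
  have hten : (1 : Nat) ≤ 10 ^ d := Nat.one_le_pow _ _ (by norm_num)
  have hdvd10 : (2 : Nat) ∣ 10 ^ d := dvd_pow (by norm_num) (by omega)
  have hdvd10' : (5 : Nat) ∣ 10 ^ d := dvd_pow (by norm_num) (by omega)
  have not2 : ¬ (2 : Nat) ∣ 10 ^ d - 1 := by
    intro h
    have : (2 : Nat) ∣ 10 ^ d - (10 ^ d - 1) := Nat.dvd_sub hdvd10 h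
    rw [Nat.sub_sub_self hten] at this
    omega
  have not5 : ¬ (5 : Nat) ∣ 10 ^ d - 1 := by
    intro h
    have : (5 : Nat) ∣ 10 ^ d - (10 ^ d - 1) := Nat.dvd_sub hdvd10' h
    rw [Nat.sub_sub_self hten] at this
    omega
  set W : Nat := 10 ^ i * (10 ^ d - 1) with hW
  have step1 : (g * n0) * W = g * (n0 * W) := by ring
  rw [step1, Nat.mul_dvd_mul_iff_left hg]
  have hcop' : Nat.Coprime (2 ^ α * (5 ^ β * M)) n0 := hcop.symm
  have h1 : 2 ^ α * (5 ^ β * M) ∣ n0 * W ↔ 2 ^ α * (5 ^ β * M) ∣ W :=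
    ⟨fun h => hcop'.dvd_of_dvd_mul_left h, fun h => h.mul_left n0⟩
  rw [h1]
  have W2 : W = 2 ^ i * (5 ^ i * (10 ^ d - 1)) := by
    rw [hW, show (10 : Nat) ^ i = 2 ^ i * 5 ^ i from by rw [← Nat.mul_pow]]; ring
  have W5 : W = 5 ^ i * (2 ^ i * (10 ^ d - 1)) := by
    rw [hW, show (10 : Nat) ^ i = 2 ^ i * 5 ^ i from by rw [← Nat.mul_pow]]; ring
  have notdvd2 : ¬ (2 : Nat) ∣ 5 ^ i * (10 ^ d - 1) := by
    intro h
    rcases (Nat.Prime.dvd_mul p2).mp h with h' | h'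
    · exact absurd (p2.dvd_of_dvd_pow h') (by norm_num)
    · exact not2 h'
  have notdvd5 : ¬ (5 : Nat) ∣ 2 ^ i * (10 ^ d - 1) := by
    intro h
    rcases (Nat.Prime.dvd_mul p5).mp h with h' | h'
    · exact absurd (p5.dvd_of_dvd_pow h') (by norm_num)
    · exact not5 h'
  have cop2 : Nat.Coprime (2 ^ α) (5 ^ i * (10 ^ d - 1)) :=
    Nat.Coprime.pow_left α ((p2.coprime_iff_not_dvd).mpr notdvd2)
  have cop5 : Nat.Coprime (5 ^ β) (2 ^ i * (10 ^ d - 1)) :=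
    Nat.Coprime.pow_left β ((p5.coprime_iff_not_dvd).mpr notdvd5)
  have iff2 : 2 ^ α ∣ W ↔ α ≤ i := by
    rw [W2]
    constructor
    · intro h
      have := cop2.dvd_of_dvd_mul_right h
      exact (Nat.pow_dvd_pow_iff_le_right (by norm_num)).mp this
    · intro h
      exact (pow_dvd_pow 2 h).mul_right _
  have iff5 : 5 ^ β ∣ W ↔ β ≤ i := by
    rw [W5]
    constructor
    · intro h
      have := cop5.dvd_of_dvd_mul_right h
      exact (Nat.pow_dvd_pow_iff_le_right (by norm_num)).mp this
    · intro h
      exact (pow_dvd_pow 5 h).mul_right _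
  have copM10 : Nat.Coprime M 10 := by
    have c2 : Nat.Coprime M 2 := ((p2.coprime_iff_not_dvd).mpr hM2).symm
    have c5 : Nat.Coprime M 5 := ((p5.coprime_iff_not_dvd).mpr hM5).symm
    exact (Nat.Coprime.mul_right c2 c5 : Nat.Coprime M (2 * 5))
  have iffM : M ∣ W ↔ M ∣ 10 ^ d - 1 := by
    rw [hW]
    constructor
    · intro h
      exact (copM10.pow_right i).dvd_of_dvd_mul_left h
    · intro h
      exact h.mul_left _
  constructor
  · intro h
    have h2 : 2 ^ α ∣ W := dvd_trans (dvd_mul_right _ _) h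
    have h5 : 5 ^ β ∣ W := dvd_trans (dvd_mul_of_dvd_right (dvd_mul_right _ _) _) h
    have hM : M ∣ W := dvd_trans (dvd_mul_of_dvd_right (dvd_mul_left _ _) _) h
    exact ⟨iff2.mp h2, iff5.mp h5, iffM.mp hM⟩
  · rintro ⟨hi2, hi5, hiM⟩
    have h2 : 2 ^ α ∣ W := iff2.mpr hi2
    have h5 : 5 ^ β ∣ W := iff5.mpr hi5
    have hM : M ∣ W := iffM.mpr hiM
    have cop5M : Nat.Coprime (5 ^ β) M :=
      Nat.Coprime.pow_left β ((p5.coprime_iff_not_dvd).mpr hM5)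
    have h5M : 5 ^ β * M ∣ W := cop5M.mul_dvd_of_dvd_of_dvd h5 hM
    have cop25M : Nat.Coprime (2 ^ α) (5 ^ β * M) := by
      have c25 : Nat.Coprime 2 (5 ^ β) :=
        Nat.Coprime.pow_right β ((p2.coprime_iff_not_dvd).mpr (by norm_num))
      have c2M : Nat.Coprime 2 M := (p2.coprime_iff_not_dvd).mpr hM2
      exact Nat.Coprime.pow_left α (Nat.Coprime.mul_right c25 c2M)
    exact cop25M.mul_dvd_of_dvd_of_dvd h2 h5M

theorem dvd_char (t0 b : Int) (hb : b ≠ 0) (α β M : Nat)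
    (hM2 : ¬ 2 ∣ M) (hM5 : ¬ 5 ∣ M)
    (hfact : b.natAbs = Int.gcd t0 b * (2 ^ α * (5 ^ β * M)))
    (i d : Nat) (hd : 1 ≤ d) :
    b ∣ t0 * 10 ^ i * (10 ^ d - 1) ↔ (α ≤ i ∧ β ≤ i ∧ (M : Int) ∣ 10 ^ d - 1) := by
  have hgpos : 0 < Int.gcd t0 b := Int.gcd_pos_iff.mpr (Or.inr hb)
  have hten : (1 : Nat) ≤ 10 ^ d := Nat.one_le_pow _ _ (by norm_num)
  have hcastW : ((10 : Int) ^ i * ((10 : Int) ^ d - 1)) = ((10 ^ i * (10 ^ d - 1) : Nat) : Int) := by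
    push_cast [Nat.cast_sub hten]
    ring
  have hX : t0 * 10 ^ i * ((10 : Int) ^ d - 1) = t0 * ((10 ^ i * (10 ^ d - 1) : Nat) : Int) := by
    rw [← hcastW]; ring
  have hcastM : ((10 : Int) ^ d - 1) = ((10 ^ d - 1 : Nat) : Int) := by
    push_cast [Nat.cast_sub hten]; ring
  have hgcddef : Int.gcd t0 b = Nat.gcd t0.natAbs b.natAbs := Int.gcd_def t0 b
  have hdvdt : Int.gcd t0 b ∣ t0.natAbs := by rw [hgcddef]; exact Nat.gcd_dvd_left _ _
  have hn0 : Int.gcd t0 b * (t0.natAbs / Int.gcd t0 b) = t0.natAbs := Nat.mul_div_cancel' hdvdt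
  have hcop : Nat.Coprime (t0.natAbs / Int.gcd t0 b) (2 ^ α * (5 ^ β * M)) := by
    have h := Nat.coprime_div_gcd_div_gcd (m := t0.natAbs) (n := b.natAbs)
      (by rw [← hgcddef]; exact hgpos)
    rw [← hgcddef] at h
    have hb1 : b.natAbs / Int.gcd t0 b = 2 ^ α * (5 ^ β * M) := by
      rw [hfact]; exact Nat.mul_div_cancel_left _ hgpos
    rwa [hb1] at h
  rw [hX, ← Int.natAbs_dvd_natAbs, Int.natAbs_mul, Int.natAbs_natCast, hfact, ← hn0,
    nat_dvd_char _ _ α β M i d hgpos hcop hM2 hM5 hd, hcastM, Int.natCast_dvd_natCast]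

theorem Tseq_eq_iff (t0 b : Int) (hb : b ≠ 0) (α β M : Nat)
    (hM2 : ¬ 2 ∣ M) (hM5 : ¬ 5 ∣ M)
    (hfact : b.natAbs = Int.gcd t0 b * (2 ^ α * (5 ^ β * M)))
    (i j : Nat) (hij : i < j) :
    Tseq b t0 i = Tseq b t0 j ↔ (α ≤ i ∧ β ≤ i ∧ (M : Int) ∣ 10 ^ (j - i) - 1) := by
  unfold Tseq
  rw [pm_congr_iff _ _ _ hb]
  have hsplit : (10 : Int) ^ j = 10 ^ i * 10 ^ (j - i) := by
    rw [← pow_add]; congr 1; omega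
  have he : t0 * 10 ^ i - t0 * 10 ^ j = -(t0 * 10 ^ i * (10 ^ (j - i) - 1)) := by
    rw [hsplit]; ring
  rw [he, dvd_neg]
  exact dvd_char t0 b hb α β M hM2 hM5 hfact i (j - i) (by omega)

-- ---------- injectivity of str on ℤ ----------

theorem digitChar_inj (d e : Nat) (hd : d < 10) (he : e < 10)
    (h : Nat.digitChar d = Nat.digitChar e) : d = e := by
  revert h
  interval_cases d <;> interval_cases e <;> decide

theorem toDigits_inj (m : Nat) : ∀ n, Nat.toDigits 10 m = Nat.toDigits 10 n → m = n := by
  induction m using Nat.strong_induction_on with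
  | _ m ih =>
    intro n h
    by_cases hm : m < 10 <;> by_cases hn : n < 10
    · rw [Nat.toDigits_of_lt_base hm, Nat.toDigits_of_lt_base hn] at h
      simp only [List.cons.injEq] at h
      exact digitChar_inj m n hm hn h.1
    · exfalso
      have hlen := congrArg List.length h
      rw [Nat.toDigits_of_lt_base hm] at hlen
      simp only [List.length_cons, List.length_nil] at hlen
      have h1 : (Nat.toDigits 10 n).length ≤ 1 := by omega
      have h2 := (Nat.length_toDigits_le_iff (by norm_num) (by norm_num)).mp h1
      norm_num at h2
      omega
    · exfalso
      have hlen := congrArg List.length h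
      rw [Nat.toDigits_of_lt_base hn] at hlen
      simp only [List.length_cons, List.length_nil] at hlen
      have h1 : (Nat.toDigits 10 m).length ≤ 1 := by omega
      have h2 := (Nat.length_toDigits_le_iff (by norm_num) (by norm_num)).mp h1
      norm_num at h2
      omega
    · rw [Nat.toDigits_of_base_le (n := m) (by norm_num) (by omega),
        Nat.toDigits_of_base_le (n := n) (by norm_num) (by omega)] at h
      obtain ⟨h1, h2⟩ := List.append_inj' h rfl
      have hdiv : m / 10 = n / 10 := ih (m / 10) (by omega) (n / 10) h1
      simp only [List.cons.injEq] at h2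
      have hmod : m % 10 = n % 10 :=
        digitChar_inj _ _ (Nat.mod_lt _ (by norm_num)) (Nat.mod_lt _ (by norm_num)) h2.1
      omega

theorem toStr_inj (m n : Int) (h : PySem.Int.toStr m = PySem.Int.toStr n) : m = n := by
  have h' := congrArg String.toList h
  rw [PySem.Int.toList_toStr, PySem.Int.toList_toStr] at h'
  have hdig : ∀ (k : Nat) (l : List Char), Nat.toDigits 10 k ≠ '-' :: l := by
    intro k l hcontra
    have hmem : '-' ∈ Nat.toDigits 10 k := by rw [hcontra]; exact List.mem_cons_self
    have := Nat.isDigit_of_mem_toDigits (by norm_num) (by norm_num) hmem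
    simp [Char.isDigit] at this
  by_cases hm : m < 0 <;> by_cases hn : n < 0 <;>
    simp only [PySem.Int.toChars, hm, hn, if_pos, if_false] at h'
  · simp only [List.cons.injEq] at h'
    have := toDigits_inj _ _ h'.2
    omega
  · exact absurd h'.symm (hdig _ _)
  · exact absurd h' (hdig _ _)
  · have := toDigits_inj _ _ h'
    omega

-- ---------- B's loops ----------

theorem gcdLoop_eq (f : Nat) : ∀ (x y : Int), 0 ≤ x → 0 ≤ y → y.toNat < f →
    gcdLoop f x y = (Nat.gcd y.toNat x.toNat : Int) := by
  induction f with
  | zero => intro x y _ _ hf; omega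
  | succ f ih =>
    intro x y hx hy hf
    rw [gcdLoop]
    by_cases h0 : y = 0
    · rw [if_pos h0, h0]
      simp [Int.toNat_of_nonneg hx]
    · have hypos : 0 < y := lt_of_le_of_ne hy (Ne.symm h0)
      rw [if_neg h0]
      have hmod : PySem.Int.mod x y = x % y := PySem.Int.mod_eq_emod_of_pos hypos
      have h1 : 0 ≤ x % y := Int.emod_nonneg x h0
      have h2 : x % y < y := Int.emod_lt_of_pos x hypos
      have hfuel : (x % y).toNat < f := by omega
      rw [hmod, ih y (x % y) hy h1 hfuel]
      have h3 : (x % y).toNat = x.toNat % y.toNat := by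
        have hc : ((x % y).toNat : Int) = ((x.toNat % y.toNat : Nat) : Int) := by
          push_cast
          rw [Int.toNat_of_nonneg h1, Int.toNat_of_nonneg hx, Int.toNat_of_nonneg hy]
        exact_mod_cast hc
      rw [h3]
      norm_cast
      rw [Nat.gcd_rec y.toNat x.toNat]

theorem stripLoop_eq (q : Int) (hq : 1 < q) (f : Nat) : ∀ (d c : Int), 0 < d → d.natAbs < f →
    ∃ (k : Nat) (d' : Int), stripLoop q f d c = (d', c + k) ∧ d = q ^ k * d' ∧ ¬ q ∣ d' ∧ 0 < d' := by
  induction f with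
  | zero => intro d c hd hf; omega
  | succ f ih =>
    intro d c hd hf
    rw [stripLoop]
    by_cases hdvd : PySem.Int.mod d q = 0
    · have hqdvd : q ∣ d := (PySem.Int.mod_eq_zero_iff_dvd d q).mp hdvd
      have hqpos : (0 : Int) < q := by omega
      have hfd : PySem.Int.floordiv d q = d / q := PySem.Int.floordiv_eq_ediv_of_pos hqpos
      have hmul : q * (d / q) = d := Int.mul_ediv_cancel' hqdvd
      have hd1pos : 0 < d / q := by
        rcases lt_trichotomy (d / q) 0 with h | h | h
        · nlinarith
        · exfalso; rw [h, mul_zero] at hmul; omega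
        · exact h
      have hd1lt : d / q < d := by nlinarith
      have hfuel : (d / q).natAbs < f := by omega
      obtain ⟨k, d', heq, hfac, hnd, hdp⟩ := ih (d / q) (c + 1) hd1pos hfuel
      refine ⟨k + 1, d', ?_, ?_, hnd, hdp⟩
      · rw [if_pos hdvd, hfd, heq]
        congr 1
        push_cast
        ring
      · rw [← hmul, hfac]
        ring
    · rw [if_neg hdvd]
      exact ⟨0, d, by simp, by simp, fun hq' => hdvd ((PySem.Int.mod_eq_zero_iff_dvd d q).mpr hq'), hd⟩

theorem ordLoop_eq (m : Int) (hm : 0 < m) (N : Nat)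
    (hN : (m : Int) ∣ 10 ^ N - 1) (hmin : ∀ j, 1 ≤ j → j < N → ¬ (m : Int) ∣ 10 ^ j - 1) :
    ∀ (f p : Nat), 1 ≤ p → p ≤ N → N - p < f →
      ordLoop m f (PySem.Int.mod (10 ^ p) m) (p : Int) = (N : Int) := by
  intro f
  induction f with
  | zero => intro p _ _ hf; omega
  | succ f ih =>
    intro p hp hpN hf
    rw [ordLoop]
    rcases eq_or_lt_of_le hpN with heq | hlt
    · rw [if_pos, heq]
      rw [pm_congr_iff _ _ _ (ne_of_gt hm), heq]
      exact hN
    · rw [if_neg]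
      · have hr : PySem.Int.mod (PySem.Int.mod (10 ^ p) m * 10) m
            = PySem.Int.mod (10 ^ (p + 1)) m := by
          rw [pm_mul10 _ _ (ne_of_gt hm), pow_succ]
        rw [hr, show ((p : Int) + 1) = ((p + 1 : Nat) : Int) from by push_cast; ring]
        exact ih (p + 1) (by omega) hlt (by omega)
      · rw [pm_congr_iff _ _ _ (ne_of_gt hm)]
        exact hmin p hp hlt

theorem ord_exists_aux (m : Nat) (hm : 0 < m) (hco : Nat.Coprime m 10)
    (i j : Nat) (hij : i < j) (hj : j < m + 1)
    (hfeq : 10 ^ i % m = 10 ^ j % m) :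
    ∃ k, (1 ≤ k ∧ (m : Int) ∣ 10 ^ k - 1) ∧ k ≤ m := by
  refine ⟨j - i, ⟨by omega, ?_⟩, by omega⟩
  have hmodeq : Nat.ModEq m (10 ^ i) (10 ^ j) := hfeq
  have hdvdN : m ∣ 10 ^ j - 10 ^ i := (Nat.modEq_iff_dvd' (Nat.pow_le_pow_right (by norm_num) (by omega))).mp hmodeq
  have hsplit : 10 ^ j - 10 ^ i = 10 ^ i * (10 ^ (j - i) - 1) := by
    rw [Nat.mul_sub, mul_one, ← pow_add]
    congr 2
    omega
  rw [hsplit] at hdvdN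
  have hdvd' : m ∣ 10 ^ (j - i) - 1 := (hco.pow_right i).dvd_of_dvd_mul_left hdvdN
  have hone : (1 : Nat) ≤ 10 ^ (j - i) := Nat.one_le_pow _ _ (by norm_num)
  have : ((10 ^ (j - i) - 1 : Nat) : Int) = (10 : Int) ^ (j - i) - 1 := by
    push_cast [Nat.cast_sub hone]; ring
  rw [← this]
  exact_mod_cast hdvd'

theorem ord_exists (m : Nat) (hm : 0 < m) (hco : Nat.Coprime m 10) :
    ∃ k, (1 ≤ k ∧ (m : Int) ∣ 10 ^ k - 1) ∧ k ≤ m := by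
  have hmap : Set.MapsTo (fun k : Nat => 10 ^ k % m) ↑(Finset.range (m + 1)) ↑(Finset.range m) := by
    intro k _
    simp only [Finset.coe_range, Set.mem_Iio]
    exact Nat.mod_lt _ hm
  obtain ⟨i, hi, j, hj, hne, hfeq⟩ :=
    Finset.exists_ne_map_eq_of_card_lt_of_maps_to (by simp) hmap
  simp only [Finset.mem_range] at hi hj
  -- order i < j without loss of generality
  rcases lt_or_gt_of_ne hne with hij | hij
  case _ =>
    exact ord_exists_aux m hm hco i j hij hj hfeq
  case _ =>
    exact ord_exists_aux m hm hco j i hij hi hfeq.symm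

-- ---------- running the two digit loops ----------

def rems (b t0 : Int) (n : Nat) : List String :=
  (List.range n).map (fun i => PySem.Int.toStr (Tseq b t0 i))

def digs (b t0 : Int) (n : Nat) : List String :=
  (List.range n).map (fun i => PySem.Int.toStr (PySem.Int.floordiv (Tseq b t0 i * 10) b))

theorem digitLoop_run (b t0 : Int) (hb : b ≠ 0) :
    ∀ (n k : Nat), digitLoop b n (digs b t0 k) (Tseq b t0 k) = (digs b t0 (k + n), Tseq b t0 (k + n)) := by
  intro n
  induction n with
  | zero => intro k; simp [digitLoop]
  | succ n ih =>
    intro k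
    rw [digitLoop]
    have hdg : digs b t0 k ++ [PySem.Int.toStr (PySem.Int.floordiv (Tseq b t0 k * 10) b)]
        = digs b t0 (k + 1) := by
      unfold digs
      rw [List.range_succ, List.map_append, List.map_cons, List.map_nil]
    have hT : PySem.Int.mod (Tseq b t0 k * 10) b = Tseq b t0 (k + 1) := (Tseq_succ b t0 hb k).symm
    rw [hdg, hT, ih (k + 1)]
    congr 2 <;> omega

theorem aLoop_run (b t0 : Int) (hb : b ≠ 0) (n : Nat)
    (hdist : ∀ i j, i < j → j < n → Tseq b t0 i ≠ Tseq b t0 j)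
    (hrep : ∃ s, s < n ∧ Tseq b t0 n = Tseq b t0 s) :
    ∀ (f k : Nat), k ≤ n → n - k < f →
      aLoop b f (rems b t0 k) (digs b t0 k) (Tseq b t0 k) = (rems b t0 n, digs b t0 n, Tseq b t0 n) := by
  intro f
  induction f with
  | zero => intro k _ hf; omega
  | succ f ih =>
    intro k hk hf
    rw [aLoop]
    rcases eq_or_lt_of_le hk with heq | hlt
    · subst heq
      rw [if_pos]
      obtain ⟨s, hs, hrep⟩ := hrep
      rw [hrep]
      unfold rems
      exact List.mem_map.mpr ⟨s, List.mem_range.mpr hs, rfl⟩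
    · rw [if_neg]
      · have hrm : rems b t0 k ++ [PySem.Int.toStr (Tseq b t0 k)] = rems b t0 (k + 1) := by
          unfold rems
          rw [List.range_succ, List.map_append, List.map_cons, List.map_nil]
        have hdg : digs b t0 k ++ [PySem.Int.toStr (PySem.Int.floordiv (Tseq b t0 k * 10) b)]
            = digs b t0 (k + 1) := by
          unfold digs
          rw [List.range_succ, List.map_append, List.map_cons, List.map_nil]
        have hT : PySem.Int.mod (Tseq b t0 k * 10) b = Tseq b t0 (k + 1) :=
          (Tseq_succ b t0 hb k).symm
        simp only []
        rw [hrm, hdg, hT]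
        exact ih (k + 1) (by omega) (by omega)
      · intro hmem
        unfold rems at hmem
        obtain ⟨i, hi, hieq⟩ := List.mem_map.mp hmem
        rw [List.mem_range] at hi
        exact hdist i k hi hlt (toStr_inj _ _ hieq)

theorem length_rems (b t0 : Int) (n : Nat) : (rems b t0 n).length = n := by
  unfold rems; simp

theorem length_digs (b t0 : Int) (n : Nat) : (digs b t0 n).length = n := by
  unfold digs; simp

theorem rems_succ (b t0 : Int) (k : Nat) :
    rems b t0 (k + 1) = rems b t0 k ++ [PySem.Int.toStr (Tseq b t0 k)] := by
  unfold rems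
  rw [List.range_succ, List.map_append, List.map_cons, List.map_nil]

theorem Tseq_zero (a b : Int) (hb : b ≠ 0) :
    Tseq b (PySem.Int.mod a b) 0 = PySem.Int.mod a b := by
  unfold Tseq
  rw [pow_zero, mul_one]
  exact pm_idem a b hb

theorem index_rems (b t0 : Int) (n s : Nat) (hs : s < n)
    (hnot : ∀ i, i < s → Tseq b t0 i ≠ Tseq b t0 s) :
    PySem.List.index? (rems b t0 n) (PySem.Int.toStr (Tseq b t0 s)) = some s := by
  have hnotmem : PySem.Int.toStr (Tseq b t0 s) ∉ rems b t0 s := by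
    intro hmem
    obtain ⟨i, hi, hieq⟩ := List.mem_map.mp hmem
    rw [List.mem_range] at hi
    exact hnot i hi (toStr_inj _ _ hieq)
  obtain ⟨r, hr⟩ : ∃ r, n = (s + 1) + r := ⟨n - (s + 1), by omega⟩
  subst hr
  have hsplit : rems b t0 ((s + 1) + r) = rems b t0 (s + 1) ++
      ((List.range' (s + 1) r).map fun i => PySem.Int.toStr (Tseq b t0 i)) := by
    unfold rems
    rw [← List.map_append]
    congr 1
    rw [List.range_add, List.range'_eq_map_range]
  have hmem1 : PySem.Int.toStr (Tseq b t0 s) ∈ rems b t0 (s + 1) := by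
    rw [rems_succ]
    exact List.mem_append_right _ (List.mem_singleton.mpr rfl)
  rw [hsplit, PySem.List.index?_append_of_mem _ hmem1, rems_succ,
    PySem.List.index?_append_singleton_self _ _ hnotmem, length_rems]

-- A's value, given the combinatorial structure of the remainder sequence
theorem A_canonical (a b : Int) (hb : b ≠ 0) (n s : Nat) (hs : s < n) (hnb : n ≤ b.natAbs)
    (hdist : ∀ i j, i < j → j < n → Tseq b (PySem.Int.mod a b) i ≠ Tseq b (PySem.Int.mod a b) j)
    (hrep : Tseq b (PySem.Int.mod a b) n = Tseq b (PySem.Int.mod a b) s) :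
    exactly_divide a b =
      [ PySem.Int.toStr (PySem.Int.floordiv a b),
        PySem.Str.join "" ((digs b (PySem.Int.mod a b) n).take s),
        PySem.Str.join "" ((digs b (PySem.Int.mod a b) n).drop s) ] := by
  set t0 := PySem.Int.mod a b with ht0
  have hrun := aLoop_run b t0 hb n hdist ⟨s, hs, hrep⟩ (b.natAbs + 1) 0 (by omega) (by omega)
  have h0r : rems b t0 0 = [] := rfl
  have h0d : digs b t0 0 = [] := rfl
  have h0T : Tseq b t0 0 = t0 := Tseq_zero a b hb
  rw [h0r, h0d, h0T] at hrun
  unfold exactly_divide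
  dsimp only
  rw [← ht0, hrun]
  have hidx : PySem.List.index? (rems b t0 n) (PySem.Int.toStr (Tseq b t0 n)) = some s := by
    rw [hrep]
    exact index_rems b t0 n s hs (fun i hi => hdist i s hi hs)
  rw [hidx]
  have hlen : PySem.List.len (rems b t0 n) = (n : Int) := by
    rw [PySem.List.len_eq, length_rems]
  have h2 : PySem.List.slice (digs b t0 n) none (some ((s : Nat) : Int))
      = (digs b t0 n).take s := PySem.List.slice_to_natCast _ _
  have hneg : ((s : Nat) : Int) - (n : Int) = -(((n - s : Nat) : Int)) := by omega
  have h3 : PySem.List.slice (digs b t0 n) (some (((s : Nat) : Int) - (n : Int))) none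
      = (digs b t0 n).drop s := by
    rw [hneg, PySem.List.slice_from_neg_natCast _ _ (by omega), length_digs]
    congr 1
    omega
  rw [hlen]
  dsimp only
  rw [h2, h3]

-- n ∣ 10^k - 1 over ℤ matches the same statement over ℕ
theorem dvd_ten_pow_cast (M k : Nat) :
    (M : Int) ∣ (10 : Int) ^ k - 1 ↔ M ∣ 10 ^ k - 1 := by
  have hone : (1 : Nat) ≤ 10 ^ k := Nat.one_le_pow _ _ (by norm_num)
  rw [show ((10 : Int) ^ k - 1) = ((10 ^ k - 1 : Nat) : Int) from by
      push_cast [Nat.cast_sub hone]; ring,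
    Int.natCast_dvd_natCast]

theorem size_bound (α β M : Nat) (hM : 0 < M) : max α β + M ≤ 2 ^ α * (5 ^ β * M) := by
  have h1 : max α β + 1 ≤ 2 ^ α * 5 ^ β := by
    have h2 : max α β < 2 ^ (α + β) := lt_of_le_of_lt (by omega) Nat.lt_two_pow_self
    have h3 : 2 ^ (α + β) ≤ 2 ^ α * 5 ^ β := by
      rw [pow_add]
      exact Nat.mul_le_mul_left _ (Nat.pow_le_pow_left (by norm_num) β)
    omega
  have h4 : (max α β + 1) * M ≤ (2 ^ α * 5 ^ β) * M := Nat.mul_le_mul_right _ h1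
  have h5 : max α β ≤ max α β * M := Nat.le_mul_of_pos_right _ hM
  rw [← mul_assoc]
  nlinarith

-- ===== VERDICT (by name: the statement is the Claim_ definition above) =====
theorem exactly_divide_spec : Claim_equal_exactly_divide := by
  intro a b _ hbpre
  have hb : b ≠ 0 := hbpre
  unfold Spec_exactly_divide
  set t0 := PySem.Int.mod a b with ht0
  -- ---- the arithmetic quantities B computes ----
  have hbabs : 0 < b.natAbs := by omega
  have hG : gcdLoop (b.natAbs + 2) (t0.natAbs : Int) (b.natAbs : Int)
      = (Nat.gcd t0.natAbs b.natAbs : Int) := by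
    rw [gcdLoop_eq (b.natAbs + 2) _ _ (by positivity) (by positivity) (by simp)]
    simp only [Int.toNat_natCast]
    rw [Nat.gcd_comm]
  set G := Nat.gcd t0.natAbs b.natAbs with hGdef
  have hGpos : 0 < G := Nat.gcd_pos_of_pos_right _ hbabs
  have hGdvd : G ∣ b.natAbs := Nat.gcd_dvd_right _ _
  set B1 := b.natAbs / G with hB1def
  have hB1fact : b.natAbs = G * B1 := (Nat.mul_div_cancel' hGdvd).symm
  have hB1pos : 0 < B1 := by
    rcases Nat.eq_zero_or_pos B1 with h | h
    · rw [h, mul_zero] at hB1fact; omega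
    · exact h
  have hd0 : PySem.Int.floordiv ((b.natAbs : Nat) : Int) ((G : Nat) : Int)
      = ((B1 : Nat) : Int) := by
    rw [PySem.Int.floordiv_natCast, hB1def]
  obtain ⟨α, d1, heq2, hfac2, hnd2, hd1pos⟩ :=
    stripLoop_eq 2 (by norm_num) (((B1 : Nat) : Int).natAbs + 1) ((B1 : Nat) : Int) 0
      (by exact_mod_cast hB1pos) (by simp)
  obtain ⟨β, m, heq5, hfac5, hnd5, hmpos⟩ :=
    stripLoop_eq 5 (by norm_num) (d1.natAbs + 1) d1 0 hd1pos (by omega)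
  set Mn := m.toNat with hMndef
  have hmcast : m = (Mn : Int) := by omega
  have hm2 : ¬ (2 : Int) ∣ m := by
    intro h
    exact hnd2 (hfac5 ▸ Dvd.dvd.mul_left h (5 ^ β))
  have hMn2 : ¬ (2 : Nat) ∣ Mn := by
    intro h
    apply hm2
    rw [hmcast]
    exact_mod_cast Int.natCast_dvd_natCast.mpr h
  have hMn5 : ¬ (5 : Nat) ∣ Mn := by
    intro h
    apply hnd5
    rw [hmcast]
    exact_mod_cast Int.natCast_dvd_natCast.mpr h
  have hMnpos : 0 < Mn := by omega
  have hB1nat : B1 = 2 ^ α * (5 ^ β * Mn) := by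
    have hcast : ((B1 : Nat) : Int) = 2 ^ α * (5 ^ β * (Mn : Int)) := by
      rw [hfac2, hfac5, hmcast]
    exact_mod_cast hcast
  have hgcdint : Int.gcd t0 b = G := Int.gcd_def t0 b
  have hfact : b.natAbs = Int.gcd t0 b * (2 ^ α * (5 ^ β * Mn)) := by
    rw [hgcdint, ← hB1nat]
    exact hB1fact
  have hco : Nat.Coprime Mn 10 := by
    have c2 : Nat.Coprime Mn 2 := ((Nat.prime_two.coprime_iff_not_dvd).mpr hMn2).symm
    have c5 : Nat.Coprime Mn 5 := ((Nat.prime_five.coprime_iff_not_dvd).mpr hMn5).symm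
    exact (Nat.Coprime.mul_right c2 c5 : Nat.Coprime Mn (2 * 5))
  -- ---- the multiplicative order N of 10 mod Mn ----
  have hexN := ord_exists Mn hMnpos hco
  have hex : ∃ k, 1 ≤ k ∧ Mn ∣ 10 ^ k - 1 := by
    obtain ⟨k, ⟨h1, h2⟩, _⟩ := hexN
    exact ⟨k, h1, (dvd_ten_pow_cast Mn k).mp h2⟩
  set N := Nat.find hex with hNdef
  have hNspec := Nat.find_spec hex
  have hNdvd : (Mn : Int) ∣ 10 ^ N - 1 := (dvd_ten_pow_cast Mn N).mpr hNspec.2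
  have hNmin : ∀ j, 1 ≤ j → j < N → ¬ (Mn : Int) ∣ 10 ^ j - 1 := by
    intro j h1 hj hd
    exact Nat.find_min hex hj ⟨h1, (dvd_ten_pow_cast Mn j).mp hd⟩
  have hNle : N ≤ Mn := by
    obtain ⟨k, ⟨h1, h2⟩, hkm⟩ := hexN
    exact le_trans (Nat.find_min' hex ⟨h1, (dvd_ten_pow_cast Mn k).mp h2⟩) hkm
  have hN1 : 1 ≤ N := hNspec.1
  have hordeval : ordLoop m (m.natAbs + 1) (PySem.Int.mod 10 m) 1 = (N : Int) := by
    have hNdvd' : m ∣ 10 ^ N - 1 := by rw [hmcast]; exact hNdvd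
    have hNmin' : ∀ j, 1 ≤ j → j < N → ¬ m ∣ 10 ^ j - 1 := by
      intro j h1 hj
      rw [hmcast]
      exact hNmin j h1 hj
    calc ordLoop m (m.natAbs + 1) (PySem.Int.mod 10 m) 1
        = ordLoop m (m.natAbs + 1) (PySem.Int.mod (10 ^ 1) m) ((1 : Nat) : Int) := by norm_num
      _ = (N : Int) := ordLoop_eq m hmpos N hNdvd' hNmin' (m.natAbs + 1) 1 le_rfl hN1 (by omega)
  -- ---- preperiod and total run length ----
  set s0 := max α β with hs0def
  set snp := s0 + N with hsnpdef
  have hsnp_le : snp ≤ b.natAbs := by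
    have h1 := size_bound α β Mn hMnpos
    calc snp ≤ 2 ^ α * (5 ^ β * Mn) := by omega
      _ ≤ G * (2 ^ α * (5 ^ β * Mn)) := Nat.le_mul_of_pos_left _ hGpos
      _ = b.natAbs := by rw [← hB1nat]; exact hB1fact.symm
  have hdist : ∀ i j, i < j → j < snp → Tseq b t0 i ≠ Tseq b t0 j := by
    intro i j hij hj heq
    obtain ⟨hα, hβ, hdvd⟩ := (Tseq_eq_iff t0 b hb α β Mn hMn2 hMn5 hfact i j hij).mp heq
    have his0 : s0 ≤ i := max_le hα hβ
    by_cases hcase : j - i < N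
    · exact hNmin (j - i) (by omega) hcase hdvd
    · omega
  have hrep : Tseq b t0 snp = Tseq b t0 s0 := by
    refine ((Tseq_eq_iff t0 b hb α β Mn hMn2 hMn5 hfact s0 snp (by omega)).mpr
      ⟨le_max_left _ _, le_max_right _ _, ?_⟩).symm
    rw [show snp - s0 = N from by omega]
    exact hNdvd
  -- ---- A's value ----
  have hA := A_canonical a b hb snp s0 (by omega) hsnp_le hdist hrep
  rw [← ht0] at hA
  -- ---- B's value ----
  have hB : exactly_divide_alt a b =
      [ PySem.Int.toStr (PySem.Int.floordiv a b),
        PySem.Str.join "" ((digs b t0 snp).take s0),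
        PySem.Str.join "" ((digs b t0 snp).drop s0) ] := by
    unfold exactly_divide_alt
    dsimp only
    rw [← ht0, hG, hd0]
    rw [heq2]
    dsimp only
    rw [heq5]
    dsimp only
    rw [hordeval]
    simp only [zero_add]
    rw [show max ((α : Nat) : Int) ((β : Nat) : Int) = ((s0 : Nat) : Int) from by
      rw [hs0def]; exact_mod_cast (Nat.cast_max α β).symm]
    rw [show (((s0 : Nat) : Int) + ((N : Nat) : Int)).toNat = snp from by omega]
    have hdl : digitLoop b snp [] t0 = (digs b t0 snp, Tseq b t0 snp) := by
      have hrun := digitLoop_run b t0 hb snp 0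
      rw [show digs b t0 0 = [] from rfl, Tseq_zero a b hb, Nat.zero_add] at hrun
      exact hrun
    rw [hdl]
    dsimp only
    rw [PySem.List.slice_to_natCast, PySem.List.slice_from_natCast]
  rw [hA, hB]
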